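-- pv_equiv track=rewrite | github.com/yeeunlim/Algorithm | 프로그래머스/1/140108. 문자열 나누기/문자열 나누기.py | solution
-- ===== SOURCE A (Python) =====
-- def solution(s):
--     answer = 0
--     count_target = 0    # 기준 문자의 등장 횟수
--     count_others = 0    # 기준 문자가 아닌 다른 문자의 등장 횟수
--     target_char = ""    # 현재 그룹의 기준 문자
--
--     for char in s:
--         # 두 카운트가 같으면 새로운 그룹이 시작되는 시점
--         if count_target == count_others:
--             answer += 1
--             target_char = char  # 현재 문자를 새로운 기준 문자로 설정
--
--         # 현재 문자가 기준 문자인지 여부에 따라 카운트를 올림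
--         if char == target_char:
--             count_target += 1
--         else:
--             count_others += 1
--
--     return answer
-- ===== SOURCE B (Python) =====
-- def solution(s):
--     n = len(s)
--     i = 0
--     ans = 0
--     while i < n:
--         ans += 1
--         target = s[i]
--         ct, co = 1, 0
--         j = i + 1
--         while j < n:
--             if s[j] == target:
--                 ct += 1
--             else:
--                 co += 1
--             j += 1
--             if ct == co:
--                 break
--         i = j
--     return ans
-- ===== Notes on version B (the rewrite author's own statement) =====
-- stated objective: alternative
-- what changed: B replaces A's single flat per-character pass carrying running group state with an explicit outer loop over groups: each outer iteration fixes the group's target character and runs an inner scan counting matches vs non-matches until they balance, then restarts at the next index.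
import Mathlib
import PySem

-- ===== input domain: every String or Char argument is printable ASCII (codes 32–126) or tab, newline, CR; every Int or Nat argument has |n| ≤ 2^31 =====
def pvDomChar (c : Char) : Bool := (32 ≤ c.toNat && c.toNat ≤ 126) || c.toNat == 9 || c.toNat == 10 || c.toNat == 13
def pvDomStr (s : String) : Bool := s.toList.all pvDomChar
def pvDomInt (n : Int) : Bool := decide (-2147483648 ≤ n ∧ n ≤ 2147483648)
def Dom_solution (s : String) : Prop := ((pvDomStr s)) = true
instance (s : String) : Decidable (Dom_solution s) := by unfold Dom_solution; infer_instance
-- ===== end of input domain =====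

-- B restructures A's single flat per-character pass into an outer loop over groups with an
-- inner scan per group (alternative decomposition, same O(n) cost).

-- ===== PORT A =====
-- state: (answer, count_target, count_others, target_char); target_char "" ported as none
def solutionStep (st : Int × Int × Int × Option Char) (c : Char) : Int × Int × Int × Option Char :=
  let (ans, ct, co, tgt) := st
  let (ans, tgt) := if ct = co then (ans + 1, some c) else (ans, tgt)
  if some c = tgt then (ans, ct + 1, co, tgt) else (ans, ct, co + 1, tgt)

def solution (s : String) : Int :=
  (s.toList.foldl solutionStep (0, 0, 0, none)).1

-- ===== PORT B =====
-- inner while loop of Source B: scan suffix counting target vs others, stop when balanced;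
-- returns the remaining suffix (= position j as a suffix of the string)
def dropGroup (target : Char) (ct co : Int) : List Char → List Char
  | [] => []
  | c :: rest =>
      let (ct', co') := if c = target then (ct + 1, co) else (ct, co + 1)
      if ct' = co' then rest else dropGroup target ct' co' rest

theorem dropGroup_length_le (target : Char) : ∀ (l : List Char) (ct co : Int),
    (dropGroup target ct co l).length ≤ l.length := by
  intro l
  induction l with
  | nil => intro ct co; simp [dropGroup]
  | cons c rest ih =>
      intro ct co
      by_cases hc : c = target <;>
        simp only [dropGroup, hc, List.length_cons] <;>
        norm_num <;>
        split_ifs <;>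
        first
          | simp
          | simp_all
          | exact le_trans (ih _ _) (Nat.le_succ _)

-- outer while loop of Source B: one iteration per group
def solGo : List Char → Int
  | [] => 0
  | c :: rest => 1 + solGo (dropGroup c 1 0 rest)
termination_by l => l.length
decreasing_by
  exact Nat.lt_succ_of_le (dropGroup_length_le _ _ _ _)

def solution_alt (s : String) : Int := solGo s.toList

-- ===== PRECONDITION & SPEC =====
def Spec_solution (s : String) (out : Int) : Prop := out = solution_alt s
instance (s : String) (out : Int) : Decidable (Spec_solution s out) := by unfold Spec_solution; infer_instance

-- ===== CLAIM (what is proved, stated in full; the proofs are below) =====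
def Claim_equal_solution : Prop := ∀ (s : String), Dom_solution s → Spec_solution s (solution s)

-- ===== LEMMAS AND PROOFS =====

-- dropGroup only looks at the difference of its counters
theorem dropGroup_shift (target : Char) : ∀ (l : List Char) (a b k : Int),
    dropGroup target (a + k) (b + k) l = dropGroup target a b l := by
  intro l
  induction l with
  | nil => intro a b k; simp [dropGroup]
  | cons c rest ih =>
      intro a b k
      simp only [dropGroup]
      by_cases hc : c = target
      · simp only [hc]
        have : a + k + 1 = a + 1 + k := by ring
        rw [this]
        by_cases he : a + 1 = b
        · simp [he]
        · have he' : ¬ (a + 1 + k = b + k) := by omega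
          simp [he, he', ih]
      · simp only [if_neg hc]
        have : b + k + 1 = b + 1 + k := by ring
        rw [this]
        by_cases he : a = b + 1
        · simp [he]
        · have he' : ¬ (a + k = b + 1 + k) := by omega
          simp [he, he', ih]

-- main invariant: A's fold from a balanced state counts the groups of the remaining list;
-- from an unbalanced mid-group state it counts the groups after the rest of the current group
theorem main_inv : ∀ (l : List Char) (ans ct co : Int) (tgt : Option Char),
    (ct = co → (l.foldl solutionStep (ans, ct, co, tgt)).1 = ans + solGo l) ∧
    (∀ t : Char, ct ≠ co → tgt = some t →
      (l.foldl solutionStep (ans, ct, co, tgt)).1 = ans + solGo (dropGroup t ct co l)) := by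
  intro l
  induction l with
  | nil =>
      intro ans ct co tgt
      constructor
      · intro _; simp [solGo]
      · intro t _ _; simp [dropGroup, solGo]
  | cons c rest ih =>
      intro ans ct co tgt
      constructor
      · intro hbal
        have hstep : solutionStep (ans, ct, co, tgt) c = (ans + 1, ct + 1, co, some c) := by
          simp [solutionStep, hbal]
        have hne : ct + 1 ≠ co := by omega
        have := (ih (ans + 1) (ct + 1) co (some c)).2 c hne rfl
        simp only [List.foldl_cons, hstep, this]
        have hsh : dropGroup c (ct + 1) co rest = dropGroup c 1 0 rest := by
          have h1 : ct + 1 = 1 + co := by omega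
          have hs := dropGroup_shift c rest 1 0 co
          rw [show (0 : Int) + co = co by ring] at hs
          rw [h1, hs]
        rw [hsh]
        simp [solGo]
        ring
      · intro t hne htgt
        subst htgt
        by_cases hc : c = t
        · have hstep : solutionStep (ans, ct, co, some t) c = (ans, ct + 1, co, some t) := by
            simp [solutionStep, hne, hc]
          have hdg : dropGroup t ct co (c :: rest) =
              if ct + 1 = co then rest else dropGroup t (ct + 1) co rest := by
            simp [dropGroup, hc]
          by_cases hb : ct + 1 = co
          · have := (ih ans (ct + 1) co (some t)).1 hb
            simp only [List.foldl_cons, hstep, this, hdg, if_pos hb]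
          · have := (ih ans (ct + 1) co (some t)).2 t hb rfl
            simp only [List.foldl_cons, hstep, this, hdg, if_neg hb]
        · have hstep : solutionStep (ans, ct, co, some t) c = (ans, ct, co + 1, some t) := by
            simp [solutionStep, hne, hc]
          have hdg : dropGroup t ct co (c :: rest) =
              if ct = co + 1 then rest else dropGroup t ct (co + 1) rest := by
            simp [dropGroup, hc]
          by_cases hb : ct = co + 1
          · have := (ih ans ct (co + 1) (some t)).1 hb
            simp only [List.foldl_cons, hstep, this, hdg, if_pos hb]
          · have := (ih ans ct (co + 1) (some t)).2 t hb rfl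
            simp only [List.foldl_cons, hstep, this, hdg, if_neg hb]

-- ===== VERDICT (by name: the statement is the Claim_ definition above) =====
theorem solution_spec : Claim_equal_solution := by
  intro s _
  unfold Spec_solution solution solution_alt
  have := (main_inv s.toList 0 0 0 none).1 rfl
  simp [this]
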